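-- pv_equiv track=rewrite | github.com/ahmedfahad04/Python-Lessons | Client's Tasks/Canada/Assignments/Assignment 3_2/WasifArkoA3Q5.py | findPalindromes
-- ===== SOURCE A (Python) =====
-- def isPalindrome(word):
--     n = len(word)  # length of 'word'
--     flag = 1
--
--     if n >= 3:      # check if the words' length is more or equal than 3
--         for i in range(0, n // 2):
--             if word[i] != word[n - i - 1]:  # checking for palindrome
--                 flag = 0
--                 break
--     else:
--         flag = 0
--
--     return flag
--
-- def findPalindromes(text):
--     palindromes = []  # stores palindrome words
--     frequencies = []  # stores frequency of palindromic words
--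
--     for item in text:
--         check = isPalindrome(item)
--
--         if item not in palindromes and check == 1:  # checking for unique palindrom word
--             palindromes.append(item)
--             frequencies.append(1)
--         elif item in palindromes and check == 1:  # incrementing frequency of repeated palindromic word
--             frequencies[palindromes.index(item)] += 1
--
--     return palindromes, frequencies
-- ===== SOURCE B (Python) =====
-- def findPalindromes(text):
--     text = list(text)
--     palindromes = []
--     for w in text:
--         if len(w) >= 3 and w == w[::-1] and w not in palindromes:
--             palindromes.append(w)
--     frequencies = [text.count(w) for w in palindromes]
--     return palindromes, frequencies
-- ===== Notes on version B (the rewrite author's own statement) =====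
-- stated objective: simpler
-- what changed: Replaces the inline index/increment frequency bookkeeping and the manual half-scan palindrome check with a two-phase decomposition: one pass collecting first-seen unique palindromes (w == w[::-1]), then frequencies computed per palindrome with text.count.
import Mathlib
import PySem

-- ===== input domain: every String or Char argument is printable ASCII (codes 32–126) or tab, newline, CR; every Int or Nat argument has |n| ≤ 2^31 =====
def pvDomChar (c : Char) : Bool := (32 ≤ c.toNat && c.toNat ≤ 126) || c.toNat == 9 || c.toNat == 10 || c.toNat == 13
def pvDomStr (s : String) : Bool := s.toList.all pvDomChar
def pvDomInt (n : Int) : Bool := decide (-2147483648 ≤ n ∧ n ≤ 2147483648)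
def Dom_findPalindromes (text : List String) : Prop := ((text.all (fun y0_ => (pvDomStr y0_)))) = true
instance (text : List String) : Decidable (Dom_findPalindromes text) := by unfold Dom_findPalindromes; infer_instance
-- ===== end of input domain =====

-- B replaces A's inline index/increment frequency bookkeeping and manual half-scan palindrome
-- test by a two-phase decomposition (collect unique palindromes, then count each with text.count);
-- objective: simpler.

-- ===== PORT A =====
-- the 'for i in range(0, n//2)' loop of isPalindrome; 'flag = 0; break' is returning 0 at the first mismatch
def isPalLoopA (word : String) (n : Int) : List Int → Int
  | [] => 1
  | i :: rest =>
      if PySem.Str.pyGet? word i ≠ PySem.Str.pyGet? word (n - i - 1) then 0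
      else isPalLoopA word n rest

def isPalindromeA (word : String) : Int :=
  let n : Int := PySem.Str.len word
  if n ≥ 3 then isPalLoopA word n (PySem.List.pyRange 0 (PySem.Int.floordiv n 2) 1)
  else 0

-- one iteration of A's 'for item in text' loop over the state (palindromes, frequencies)
def stepA (st : List String × List Int) (item : String) : List String × List Int :=
  let check := isPalindromeA item
  if ¬ st.1.contains item ∧ check = 1 then (st.1 ++ [item], st.2 ++ [1])
  else if st.1.contains item ∧ check = 1 then
    match PySem.List.index? st.1 item with
    | some k =>
        match st.2[k]? with
        | some v => (st.1, st.2.set k (v + 1))   -- frequencies[palindromes.index(item)] += 1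
        | none => st   -- unreachable: the index is < len(frequencies) throughout the loop
    | none => st       -- unreachable: item ∈ palindromes in this branch
  else st

def findPalindromes (text : List String) : List String × List Int :=
  text.foldl stepA ([], [])

-- ===== PORT B =====
-- 'if len(w) >= 3 and w == w[::-1] and w not in palindromes: palindromes.append(w)'
def palsStepB (ps : List String) (w : String) : List String :=
  if PySem.Str.len w ≥ 3 ∧ PySem.Str.slice? w none none (-1) = some w ∧ ¬ ps.contains w
  then ps ++ [w] else ps

def findPalindromes_alt (text : List String) : List String × List Int :=
  let palindromes := text.foldl palsStepB []
  let frequencies := palindromes.map (fun w => ((PySem.List.count text w : Nat) : Int))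
  (palindromes, frequencies)

-- ===== PRECONDITION & SPEC =====
def Spec_findPalindromes (text : List String) (out : List String × List Int) : Prop := out = findPalindromes_alt text
instance (text : List String) (out : List String × List Int) : Decidable (Spec_findPalindromes text out) := by unfold Spec_findPalindromes; infer_instance

-- ===== CLAIM (what is proved, stated in full; the proofs are below) =====
def Claim_equal_findPalindromes : Prop := ∀ (text : List String), Dom_findPalindromes text → Spec_findPalindromes text (findPalindromes text)

-- ===== LEMMAS AND PROOFS =====

-- the palindrome condition both checks compute, as a Bool on the character list
def palB (w : String) : Bool := decide (3 ≤ w.toList.length) && (w.toList.reverse == w.toList)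

-- the clean form of B's collection step
def uStep (ps : List String) (w : String) : List String :=
  if palB w && !ps.contains w then ps ++ [w] else ps

theorem palsStepB_eq (ps : List String) (w : String) : palsStepB ps w = uStep ps w := by
  have hof : (String.ofList w.toList.reverse = w) ↔ (w.toList.reverse = w.toList) := by
    constructor
    · intro h; simpa using congrArg String.toList h
    · intro h; rw [h]; simp
  by_cases h3 : 3 ≤ w.toList.length <;> by_cases hrev : w.toList.reverse = w.toList <;>
    by_cases hmem : w ∈ ps <;>
      simp [palsStepB, uStep, palB, PySem.Str.slice?_none_none_neg_one, PySem.Str.len_eq,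
        hof, hrev, hmem]

-- A's half-scan loop succeeds iff every tested pair of characters agrees
theorem isPalLoopA_eq_one (w : String) (n : Int) (is : List Int) :
    isPalLoopA w n is = 1 ↔ ∀ i ∈ is, PySem.Str.pyGet? w i = PySem.Str.pyGet? w (n - i - 1) := by
  induction is with
  | nil => simp [isPalLoopA]
  | cons i rest ih =>
    by_cases h : PySem.List.pyGet? w.toList i = PySem.List.pyGet? w.toList (n - i - 1)
    · simp [isPalLoopA, List.forall_mem_cons, h, ih]
    · simp [isPalLoopA, List.forall_mem_cons, h]

-- half-range characterisation of list palindromes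
theorem half_pal (l : List Char) :
    (∀ k, k < l.length / 2 → l[k]? = l[l.length - 1 - k]?) ↔ l.reverse = l := by
  constructor
  · intro h
    apply List.ext_getElem?
    intro i
    by_cases hi : i < l.length
    · rw [List.getElem?_reverse hi]
      rcases Nat.lt_or_ge i (l.length / 2) with hlt | hge
      · exact (h i hlt).symm
      · rcases Nat.lt_or_ge (l.length - 1 - i) (l.length / 2) with hlt2 | hge2
        · have h2 := h _ hlt2
          have hidx : l.length - 1 - (l.length - 1 - i) = i := by omega
          rw [hidx] at h2
          exact h2
        · have hmid : l.length - 1 - i = i := by omega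
          rw [hmid]
    · have h1 : l.reverse[i]? = none := by
        rw [List.getElem?_eq_none_iff]; simpa using Nat.le_of_not_lt hi
      have h2 : l[i]? = none := by
        rw [List.getElem?_eq_none_iff]; exact Nat.le_of_not_lt hi
      rw [h1, h2]
  · intro h k hk
    have hkl : k < l.length := by omega
    have h2 := List.getElem?_reverse (l := l) hkl
    rw [h] at h2
    exact h2

-- A's isPalindrome returns 1 exactly on palB
theorem isPalindromeA_eq_one (w : String) : isPalindromeA w = 1 ↔ palB w = true := by
  by_cases h3 : 3 ≤ w.toList.length
  · have hge : PySem.Str.len w ≥ 3 := by rw [PySem.Str.len_eq]; exact_mod_cast h3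
    have hfd : PySem.Int.floordiv (PySem.Str.len w) 2 = ((w.toList.length / 2 : Nat) : Int) := by
      rw [PySem.Str.len_eq]; exact_mod_cast PySem.Int.floordiv_natCast w.toList.length 2
    rw [isPalindromeA]
    simp only [hge, if_pos, hfd, isPalLoopA_eq_one]
    have hiff : (∀ i ∈ PySem.List.pyRange 0 ((w.toList.length / 2 : Nat) : Int) 1,
        PySem.Str.pyGet? w i = PySem.Str.pyGet? w (PySem.Str.len w - i - 1)) ↔
        (∀ k, k < w.toList.length / 2 → w.toList[k]? = w.toList[w.toList.length - 1 - k]?) := by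
      constructor
      · intro h k hk
        have hmem : ((k : Int)) ∈ PySem.List.pyRange 0 ((w.toList.length / 2 : Nat) : Int) 1 := by
          rw [PySem.List.mem_pyRange_one]
          constructor
          · exact_mod_cast Nat.zero_le k
          · exact_mod_cast hk
        have h2 := h _ hmem
        have hkl : k < w.toList.length := by omega
        have hcast : PySem.Str.len w - (k : Int) - 1 = ((w.toList.length - 1 - k : Nat) : Int) := by
          rw [PySem.Str.len_eq]; omega
        rw [hcast, PySem.Str.pyGet?_natCast, PySem.Str.pyGet?_natCast] at h2
        exact h2
      · intro h i hi
        rw [PySem.List.mem_pyRange_one] at hi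
        obtain ⟨hi0, hilt⟩ := hi
        have hk : i.toNat < w.toList.length / 2 := by omega
        have hie : i = ((i.toNat : Nat) : Int) := by omega
        have hkl : i.toNat < w.toList.length := by omega
        have hcast : PySem.Str.len w - i - 1 = ((w.toList.length - 1 - i.toNat : Nat) : Int) := by
          rw [PySem.Str.len_eq]; omega
        rw [hcast, hie, PySem.Str.pyGet?_natCast, PySem.Str.pyGet?_natCast]
        exact h _ hk
    rw [hiff, half_pal]
    simp only [palB, Bool.and_eq_true, decide_eq_true_eq, beq_iff_eq]
    exact ⟨fun h => ⟨h3, h⟩, fun h => h.2⟩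
  · rw [isPalindromeA]
    have hlt : ¬ PySem.Str.len w ≥ 3 := by rw [PySem.Str.len_eq]; omega
    rw [if_neg hlt]
    simp only [palB, Bool.and_eq_true, decide_eq_true_eq, beq_iff_eq]
    exact ⟨fun h => absurd h (by decide), fun h => absurd h.1 h3⟩

theorem mem_uFold_of_mem_init (l : List String) (init : List String) (x : String) :
    x ∈ init → x ∈ l.foldl uStep init := by
  induction l generalizing init with
  | nil => intro hx; simpa using hx
  | cons y t ih =>
    intro hx
    simp only [List.foldl_cons]
    apply ih
    unfold uStep
    split_ifs with h
    · exact List.mem_append.mpr (Or.inl hx)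
    · exact hx

theorem uFold_mem (l : List String) (init : List String) (x : String) :
    x ∈ l.foldl uStep init → x ∈ init ∨ (palB x = true ∧ x ∈ l) := by
  induction l generalizing init with
  | nil => intro h; left; simpa using h
  | cons y t ih =>
    intro h
    simp only [List.foldl_cons] at h
    rcases ih _ h with h1 | h2
    · unfold uStep at h1
      split_ifs at h1 with hc
      · rcases List.mem_append.mp h1 with h3 | h3
        · exact Or.inl h3
        · have hxy : x = y := by simpa using h3
          subst hxy
          right
          exact ⟨(Bool.and_eq_true_iff.mp hc).1, List.mem_cons_self⟩
      · exact Or.inl h1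
    · exact Or.inr ⟨h2.1, List.mem_cons_of_mem _ h2.2⟩

theorem mem_uFold_of_pal (l : List String) (init : List String) (x : String) :
    palB x = true → x ∈ l → x ∈ l.foldl uStep init := by
  induction l generalizing init with
  | nil => intro _ hx; simp at hx
  | cons y t ih =>
    intro hp hx
    simp only [List.foldl_cons]
    rcases List.mem_cons.mp hx with hxy | hxt
    · subst hxy
      apply mem_uFold_of_mem_init
      unfold uStep
      split_ifs with h
      · exact List.mem_append.mpr (Or.inr (List.mem_singleton.mpr rfl))
      · simp only [hp, Bool.true_and, Bool.not_eq_true'] at h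
        have : x ∈ init := by
          by_contra hni
          simp [hni] at h
        exact this
    · exact ih _ hp hxt

theorem nodup_uFold (l : List String) (init : List String) :
    init.Nodup → (l.foldl uStep init).Nodup := by
  induction l generalizing init with
  | nil => intro h; simpa using h
  | cons y t ih =>
    intro h
    simp only [List.foldl_cons]
    apply ih
    unfold uStep
    split_ifs with hc
    · have hny : y ∉ init := by
        have := (Bool.and_eq_true_iff.mp hc).2
        simpa [List.contains_iff_mem] using this
      simp [List.nodup_append, h]
      exact fun a ha he => hny (he ▸ ha)
    · exact h

theorem set_map_idx (U : List String) (f g : String → Int) (x : String) :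
    U.Nodup → x ∈ U → g x = f x + 1 → (∀ w ∈ U, w ≠ x → g w = f w) →
    (U.map f).set (List.idxOf x U) (f x + 1) = U.map g := by
  induction U with
  | nil => intro _ hx; simp at hx
  | cons y t ih =>
    intro hU hx hgx hg
    by_cases hyx : y = x
    · subst hyx
      have hxt : y ∉ t := (List.nodup_cons.mp hU).1
      simp only [List.idxOf_cons_self, List.map_cons, List.set_cons_zero]
      congr 1
      · exact hgx.symm
      · apply List.map_congr_left
        intro w hw
        have hwx : w ≠ y := fun he => hxt (he ▸ hw)
        exact (hg w (List.mem_cons_of_mem _ hw) hwx).symm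
    · have hxt : x ∈ t := by
        rcases List.mem_cons.mp hx with h | h
        · exact absurd h.symm hyx
        · exact h
      rw [List.idxOf_cons_ne _ hyx]
      simp only [List.map_cons, List.set_cons_succ]
      congr 1
      · exact (hg y List.mem_cons_self (fun he => hyx he)).symm
      · exact ih (List.nodup_cons.mp hU).2 hxt hgx
          (fun w hw hwx => hg w (List.mem_cons_of_mem _ hw) hwx)

-- first-match index: idxOf? of a member is some idxOf
theorem idxOf?_of_mem (U : List String) (x : String) :
    x ∈ U → List.idxOf? x U = some (List.idxOf x U) := by
  induction U with
  | nil => intro h; simp at h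
  | cons y t ih =>
    intro hx
    by_cases hyx : y = x
    · subst hyx
      simp [List.idxOf?_cons, List.idxOf_cons_self]
    · have hxt : x ∈ t := by
        rcases List.mem_cons.mp hx with h | h
        · exact absurd h.symm hyx
        · exact h
      have hbeq : (y == x) = false := by simpa using hyx
      simp [List.idxOf?_cons, List.idxOf_cons_ne _ hyx, hbeq, ih hxt]

-- one A-step starting from the invariant state lands in the invariant state for pre ++ [x]
theorem stepA_invariant (pre : List String) (x : String) :
    stepA (pre.foldl uStep [], (pre.foldl uStep []).map (fun w => (pre.count w : Int))) x
      = ((pre ++ [x]).foldl uStep [],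
         ((pre ++ [x]).foldl uStep []).map (fun w => ((pre ++ [x]).count w : Int))) := by
  have hU : (pre ++ [x]).foldl uStep [] = uStep (pre.foldl uStep []) x := by
    rw [List.foldl_append]; rfl
  set U := pre.foldl uStep [] with hUdef
  have hmemU : ∀ w ∈ U, palB w = true ∧ w ∈ pre := by
    intro w hw
    rcases uFold_mem pre [] w hw with h | h
    · simp at h
    · exact h
  by_cases hp : palB x = true
  · by_cases hm : x ∈ U
    · -- repeated palindrome: A increments the counter at x's index
      have hcont : U.contains x = true := by simpa [List.contains_iff_mem] using hm
      have hcheck : isPalindromeA x = 1 := (isPalindromeA_eq_one x).mpr hp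
      have hk : List.idxOf x U < U.length := List.idxOf_lt_length_of_mem hm
      simp only [stepA]
      rw [if_neg (fun hcon => hcon.1 hcont), if_pos ⟨hcont, hcheck⟩]
      rw [PySem.List.index?_eq_idxOf?, idxOf?_of_mem U x hm]
      have hget : (U.map (fun w => (pre.count w : Int)))[List.idxOf x U]? =
          some ((pre.count x : Int)) := by
        rw [List.getElem?_eq_getElem (by simpa using hk)]
        simp [List.getElem_idxOf hk]
      simp only [hget]
      have hstep : uStep U x = U := by
        unfold uStep
        rw [if_neg (by simp; exact fun _ => hm)]
      rw [hU, hstep]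
      have hset := set_map_idx U (fun w => (pre.count w : Int))
        (fun w => ((pre ++ [x]).count w : Int)) x
        (nodup_uFold pre [] List.nodup_nil) hm
        (by simp [List.count_append])
        (by intro w _ hwx; simp [List.count_append, Ne.symm hwx])
      simp only [hset]
    · -- new palindrome: A appends (x, 1)
      have hcont : U.contains x = false := by simpa [List.contains_iff_mem] using hm
      have hcheck : isPalindromeA x = 1 := (isPalindromeA_eq_one x).mpr hp
      rw [stepA]
      simp only [hcont, hcheck]
      rw [if_pos (by simp)]
      have hstep : uStep U x = U ++ [x] := by
        unfold uStep
        rw [if_pos (by simp [hp, hm])]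
      rw [hU, hstep]
      have hxpre : x ∉ pre := fun hxp => hm (mem_uFold_of_pal pre [] x hp hxp)
      simp only [Prod.mk.injEq, true_and]
      · simp only [List.map_append, List.map_cons, List.map_nil]
        congr 1
        · apply List.map_congr_left
          intro w hw
          have hwx : w ≠ x := fun he => hm (he ▸ hw)
          simp [List.count_append, Ne.symm hwx]
        · simp [List.count_append, List.count_eq_zero_of_not_mem hxpre]
  · -- not a palindrome: both branches of A are skipped and B's collection step is the identity
    have hcheck : isPalindromeA x ≠ 1 := fun h => hp ((isPalindromeA_eq_one x).mp h)
    rw [stepA]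
    simp only []
    rw [if_neg (fun h => hcheck h.2), if_neg (fun h => hcheck h.2)]
    have hstep : uStep U x = U := by
      unfold uStep
      rw [if_neg (by simp [hp])]
    rw [hU, hstep]
    simp only [Prod.mk.injEq, true_and]
    · apply List.map_congr_left
      intro w hw
      have hwx : w ≠ x := by
        intro he
        subst he
        exact absurd (hmemU w hw).1 hp
      simp [List.count_append, Ne.symm hwx]

theorem main_invariant (suf : List String) : ∀ (pre : List String),
    suf.foldl stepA (pre.foldl uStep [], (pre.foldl uStep []).map (fun w => (pre.count w : Int)))
      = ((pre ++ suf).foldl uStep [],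
         ((pre ++ suf).foldl uStep []).map (fun w => ((pre ++ suf).count w : Int))) := by
  induction suf with
  | nil => intro pre; simp
  | cons x t ih =>
    intro pre
    simp only [List.foldl_cons]
    rw [stepA_invariant]
    rw [ih (pre ++ [x])]
    have hq : (pre ++ [x]) ++ t = pre ++ x :: t := by simp
    rw [hq]

-- ===== VERDICT (by name: the statement is the Claim_ definition above) =====
theorem findPalindromes_spec : Claim_equal_findPalindromes := by
  intro text _
  unfold Spec_findPalindromes findPalindromes findPalindromes_alt
  have h := main_invariant text []
  simp only [List.foldl_nil, List.map_nil, List.nil_append] at h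
  rw [h]
  have hb : text.foldl palsStepB [] = text.foldl uStep [] :=
    PySem.List.foldl_congr_mem text palsStepB uStep [] (fun acc x _ => palsStepB_eq acc x)
  simp only [hb, PySem.List.count_eq]
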